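-- pv_equiv track=rewrite | github.com/shubham-1706-g/Chained | python api/app/core/engine.py | _find_executable_nodes
-- ===== SOURCE A (Python) =====
-- from typing import Dict, Any, List, Optional, Callable
--
-- def _find_executable_nodes(
--
--     nodes: Dict[str, Dict[str, Any]],
--     edges: List[Dict[str, Any]],
--     executed_nodes: set
-- ) -> List[str]:
--     """Find nodes that can be executed (all dependencies satisfied)."""
--     executable = []
--
--     for node_id, node_data in nodes.items():
--         if node_id in executed_nodes:
--             continue
--
--         # Check if all incoming edges are satisfied
--         dependencies_satisfied = True
--
--         for edge in edges:
--             if edge.get("target") == node_id: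
--                 source_node = edge.get("source")
--                 if source_node and source_node not in executed_nodes:
--                     dependencies_satisfied = False
--                     break
--
--         if dependencies_satisfied:
--             executable.append(node_id)
--
--     return executable
-- ===== SOURCE B (Python) =====
-- def _find_executable_nodes(nodes, edges, executed_nodes):
--     """Find nodes that can be executed (all dependencies satisfied)."""
--     blocked = set()
--     for edge in edges:
--         source = edge.get("source")
--         if source and source not in executed_nodes:
--             blocked.add(edge.get("target"))
--     return [node_id for node_id in nodes
--             if node_id not in executed_nodes and node_id not in blocked]
-- ===== Notes on version B (the rewrite author's own statement) =====
-- stated objective: simpler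
-- what changed: Replaces the node-by-node inner scan over all edges with one pass over edges building a 'blocked' target set, followed by a single filtering comprehension over the nodes.
import Mathlib
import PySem

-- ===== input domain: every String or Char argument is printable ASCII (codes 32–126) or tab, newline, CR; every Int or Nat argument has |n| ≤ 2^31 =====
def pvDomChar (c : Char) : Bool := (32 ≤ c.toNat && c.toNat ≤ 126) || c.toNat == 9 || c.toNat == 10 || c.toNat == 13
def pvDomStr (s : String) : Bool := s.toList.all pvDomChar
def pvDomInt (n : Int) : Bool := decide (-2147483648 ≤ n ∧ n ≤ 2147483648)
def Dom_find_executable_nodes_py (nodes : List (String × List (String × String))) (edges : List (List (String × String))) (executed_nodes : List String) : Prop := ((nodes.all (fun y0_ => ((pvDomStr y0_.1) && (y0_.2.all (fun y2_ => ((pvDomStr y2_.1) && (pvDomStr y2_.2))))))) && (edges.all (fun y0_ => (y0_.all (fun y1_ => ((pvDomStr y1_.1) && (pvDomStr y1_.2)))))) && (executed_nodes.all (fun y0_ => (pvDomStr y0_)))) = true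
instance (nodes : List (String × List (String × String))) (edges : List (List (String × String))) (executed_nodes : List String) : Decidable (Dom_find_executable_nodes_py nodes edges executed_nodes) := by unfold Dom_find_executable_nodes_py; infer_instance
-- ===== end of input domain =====

-- B replaces A's per-node scan over all edges with one edge pass building a 'blocked' target set
-- plus a single filtering pass over the nodes (objective: simpler / asymptotically faster).

-- ===== PORT A =====
-- edge.get(k) on the dict 'edge' (assoc list, first-match lookup)
def pvEdgeGet (e : List (String × String)) (k : String) : Option String :=
  (PySem.Dict.mk e).get? k

-- inner 'for edge in edges' loop with break: returns dependencies_satisfied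
def pvDepSat (edges : List (List (String × String))) (executed_nodes : List String) (node_id : String) : Bool :=
  match edges with
  | [] => true
  | e :: rest =>
    if pvEdgeGet e "target" == some node_id then
      match pvEdgeGet e "source" with
      | some src =>
        if src ≠ "" && !executed_nodes.contains src then false  -- break
        else pvDepSat rest executed_nodes node_id
      | none => pvDepSat rest executed_nodes node_id
    else pvDepSat rest executed_nodes node_id

def find_executable_nodes_py (nodes : List (String × List (String × String))) (edges : List (List (String × String))) (executed_nodes : List String) : List String :=
  nodes.foldl (fun executable p =>
    if executed_nodes.contains p.1 then executable
    else if pvDepSat edges executed_nodes p.1 then executable ++ [p.1]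
    else executable) []

-- ===== PORT B =====
-- one pass over edges: blocked = set of edge.get("target") for edges with a truthy, unexecuted source
def pvBlocked (edges : List (List (String × String))) (executed_nodes : List String) : PySem.Set (Option String) :=
  edges.foldl (fun blocked e =>
    match (PySem.Dict.mk e).get? "source" with
    | some src =>
      if src ≠ "" && !executed_nodes.contains src then
        PySem.Set.add blocked ((PySem.Dict.mk e).get? "target")
      else blocked
    | none => blocked) PySem.Set.empty

def find_executable_nodes_py_alt (nodes : List (String × List (String × String))) (edges : List (List (String × String))) (executed_nodes : List String) : List String :=
  let blocked := pvBlocked edges executed_nodes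
  (nodes.filter (fun p =>
    !executed_nodes.contains p.1 && !PySem.Set.contains blocked (some p.1))).map (·.1)

-- ===== PRECONDITION & SPEC =====
def Spec_find_executable_nodes_py (nodes : List (String × List (String × String))) (edges : List (List (String × String))) (executed_nodes : List String) (out : List String) : Prop := out = find_executable_nodes_py_alt nodes edges executed_nodes
instance (nodes : List (String × List (String × String))) (edges : List (List (String × String))) (executed_nodes : List String) (out : List String) : Decidable (Spec_find_executable_nodes_py nodes edges executed_nodes out) := by unfold Spec_find_executable_nodes_py; infer_instance

-- ===== CLAIM (what is proved, stated in full; the proofs are below) =====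
def Claim_equal_find_executable_nodes_py : Prop := ∀ (nodes : List (String × List (String × String))) (edges : List (List (String × String))) (executed_nodes : List String), Dom_find_executable_nodes_py nodes edges executed_nodes → Spec_find_executable_nodes_py nodes edges executed_nodes (find_executable_nodes_py nodes edges executed_nodes)

-- ===== LEMMAS AND PROOFS =====

-- the per-edge "blocks x" test (x ranges over Option String)
def pvBlocksOpt (executed_nodes : List String) (x : Option String) (e : List (String × String)) : Bool :=
  (match (PySem.Dict.mk e).get? "source" with
   | some src => src ≠ "" && !executed_nodes.contains src
   | none => false)
  && ((PySem.Dict.mk e).get? "target" == x)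

lemma contains_add_or {α : Type} [BEq α] [LawfulBEq α] (s : PySem.Set α) (y x : α) :
    PySem.Set.contains (PySem.Set.add s y) x = (PySem.Set.contains s x || y == x) := by
  rw [Bool.eq_iff_iff, PySem.Set.contains_iff, PySem.Set.mem_add, Bool.or_eq_true,
    PySem.Set.contains_iff, beq_iff_eq]
  exact or_congr Iff.rfl eq_comm

lemma depSat_eq_not_any (edges : List (List (String × String))) (executed_nodes : List String) (node_id : String) :
    pvDepSat edges executed_nodes node_id = !(edges.any (pvBlocksOpt executed_nodes (some node_id))) := by
  induction edges with
  | nil => rfl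
  | cons e rest ih =>
    simp only [pvDepSat, List.any_cons, pvBlocksOpt]
    rcases h : (PySem.Dict.mk e).get? "source" with _ | src <;>
      by_cases ht : pvEdgeGet e "target" == some node_id <;>
        simp only [pvEdgeGet] at ht ⊢ <;>
          simp [ht, h, ih]

lemma contains_blocked_fold (edges : List (List (String × String))) (executed_nodes : List String)
    (x : Option String) (s : PySem.Set (Option String)) :
    PySem.Set.contains (edges.foldl (fun blocked e =>
      match (PySem.Dict.mk e).get? "source" with
      | some src =>
        if src ≠ "" && !executed_nodes.contains src then
          PySem.Set.add blocked ((PySem.Dict.mk e).get? "target")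
        else blocked
      | none => blocked) s) x
      = (PySem.Set.contains s x || edges.any (pvBlocksOpt executed_nodes x)) := by
  induction edges generalizing s with
  | nil => simp
  | cons e rest ih =>
    rw [List.foldl_cons, List.any_cons]
    rcases h : (PySem.Dict.mk e).get? "source" with _ | src
    · simp only [h, pvBlocksOpt]
      rw [ih]
      simp
    · by_cases hb : (src ≠ "" && !executed_nodes.contains src) = true
      · -- reduce the step's match on 'some src' (h substituted by rcases)
        simp only [h]
        rw [if_pos hb, ih, contains_add_or]
        simp only [pvBlocksOpt, h, hb]
        simp [Bool.or_assoc]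
      · simp only [h]
        rw [if_neg hb]
        rw [ih]
        simp only [pvBlocksOpt, h]
        rw [Bool.eq_false_iff.mpr hb]
        simp

lemma contains_blocked (edges : List (List (String × String))) (executed_nodes : List String) (node_id : String) :
    PySem.Set.contains (pvBlocked edges executed_nodes) (some node_id)
      = edges.any (pvBlocksOpt executed_nodes (some node_id)) := by
  unfold pvBlocked
  rw [contains_blocked_fold]
  rfl

lemma foldl_filter_map (nodes : List (String × List (String × String))) (q : String → Bool)
    (acc : List String) :
    nodes.foldl (fun executable p => if q p.1 then executable ++ [p.1] else executable) acc
      = acc ++ (nodes.filter (fun p => q p.1)).map (·.1) := by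
  induction nodes generalizing acc with
  | nil => simp
  | cons p rest ih =>
    by_cases hq : q p.1 = true <;> simp [hq, ih]

-- ===== VERDICT (by name: the statement is the Claim_ definition above) =====
theorem find_executable_nodes_py_spec : Claim_equal_find_executable_nodes_py := by
  intro nodes edges executed_nodes _
  unfold Spec_find_executable_nodes_py find_executable_nodes_py find_executable_nodes_py_alt
  have hfun : (fun (executable : List String) (p : String × List (String × String)) =>
      if executed_nodes.contains p.1 then executable
      else if pvDepSat edges executed_nodes p.1 then executable ++ [p.1]
      else executable)
    = (fun executable p =>
      if (!executed_nodes.contains p.1 &&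
          !PySem.Set.contains (pvBlocked edges executed_nodes) (some p.1)) then executable ++ [p.1]
      else executable) := by
    funext l p
    rw [contains_blocked, depSat_eq_not_any]
    by_cases h1 : executed_nodes.contains p.1 = true <;>
      by_cases h2 : edges.any (pvBlocksOpt executed_nodes (some p.1)) = true <;>
        simp [h2]
  rw [hfun, foldl_filter_map nodes
    (fun a => !executed_nodes.contains a &&
      !PySem.Set.contains (pvBlocked edges executed_nodes) (some a)) []]
  simp
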